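-- pv_equiv track=rewrite | github.com/mb2g17/PyLex | misc.py | can_type
-- ===== SOURCE A (Python) =====
-- def can_type(tiles_grid, tiles_word):
--     # Base case; we can type this word
--     if len(tiles_word) == 0:
--         return True
--
--     # Gets the tile to type out
--     tile = tiles_word[0]
--
--     # Check if we can type out this word
--     if tile in tiles_grid:
--         # Get the index in the grid
--         index = tiles_grid.index(tile)
--
--         # Recursive call
--         return can_type(tiles_grid[:index] + tiles_grid[index + 1:], tiles_word[1:])
--
--     # If there's some wildcard we can use instead
--     if '?' in tiles_grid:
--         # Get the index in the grid
--         index = tiles_grid.index('?')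
--
--         # Recursive call
--         return can_type(tiles_grid[:index] + tiles_grid[index + 1:], tiles_word[1:])
--
--     # Base case; we can't type this word
--     return False
-- ===== SOURCE B (Python) =====
-- def can_type(tiles_grid, tiles_word):
--     counts = {}
--     for ch in tiles_grid:
--         counts[ch] = counts.get(ch, 0) + 1
--     for ch in tiles_word:
--         if counts.get(ch, 0) > 0:
--             counts[ch] -= 1
--         elif counts.get('?', 0) > 0:
--             counts['?'] -= 1
--         else:
--             return False
--     return True
-- ===== Notes on version B (the rewrite author's own statement) =====
-- stated objective: faster
-- what changed: Replaces the per-character recursion with repeated substring search, .index and string-slicing rebuilds of the grid by one counting dict built once over the grid and a single forward loop over the word that decrements counts (exact tile first, then '?').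
import Mathlib
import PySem

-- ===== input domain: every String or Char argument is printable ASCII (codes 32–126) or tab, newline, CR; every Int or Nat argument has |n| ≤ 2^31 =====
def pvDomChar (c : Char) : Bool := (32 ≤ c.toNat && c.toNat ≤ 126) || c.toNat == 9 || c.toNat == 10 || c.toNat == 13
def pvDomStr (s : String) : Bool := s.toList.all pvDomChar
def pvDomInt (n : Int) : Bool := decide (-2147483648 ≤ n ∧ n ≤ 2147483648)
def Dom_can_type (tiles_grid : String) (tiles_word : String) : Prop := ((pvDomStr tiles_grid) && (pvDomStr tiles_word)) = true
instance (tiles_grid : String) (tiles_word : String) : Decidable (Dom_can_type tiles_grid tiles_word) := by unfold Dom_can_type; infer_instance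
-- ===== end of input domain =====

-- B replaces A's per-character recursion with slicing by one counting dict and a single
-- forward loop over the word; equivalence of the two is proved for all inputs.

-- ===== PORT A =====
-- A's recursion: empty word → True; else remove the first occurrence of the tile
-- (or of '?') from the grid via index + slices and recurse on the rest of the word.
def canTypeGoA : List Char → List Char → Bool
  | _, [] => true
  | grid, tile :: rest =>
    if tile ∈ grid then
      let index : Int := ((PySem.List.index? grid tile).getD 0 : Nat)
      canTypeGoA (PySem.List.slice grid none (some index) ++
                  PySem.List.slice grid (some (index + 1)) none) rest
    else if '?' ∈ grid then
      let index : Int := ((PySem.List.index? grid '?').getD 0 : Nat)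
      canTypeGoA (PySem.List.slice grid none (some index) ++
                  PySem.List.slice grid (some (index + 1)) none) rest
    else false

def can_type (tiles_grid : String) (tiles_word : String) : Bool :=
  canTypeGoA tiles_grid.toList tiles_word.toList

-- ===== PORT B =====
-- B's loop over the word with a maintained count dict.
def canTypeGoB : PySem.Dict Char Int → List Char → Bool
  | _, [] => true
  | d, ch :: rest =>
    if d.getD ch 0 > 0 then canTypeGoB (d.insert ch (d.getD ch 0 - 1)) rest
    else if d.getD '?' 0 > 0 then canTypeGoB (d.insert '?' (d.getD '?' 0 - 1)) rest
    else false

def can_type_alt (tiles_grid : String) (tiles_word : String) : Bool :=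
  canTypeGoB
    (tiles_grid.toList.foldl (fun d x => d.insert x (d.getD x 0 + 1)) PySem.Dict.empty)
    tiles_word.toList

-- ===== PRECONDITION & SPEC =====
def Spec_can_type (tiles_grid : String) (tiles_word : String) (out : Bool) : Prop := out = can_type_alt tiles_grid tiles_word
instance (tiles_grid : String) (tiles_word : String) (out : Bool) : Decidable (Spec_can_type tiles_grid tiles_word out) := by unfold Spec_can_type; infer_instance

-- ===== CLAIM (what is proved, stated in full; the proofs are below) =====
def Claim_equal_can_type : Prop := ∀ (tiles_grid : String) (tiles_word : String), Dom_can_type tiles_grid tiles_word → Spec_can_type tiles_grid tiles_word (can_type tiles_grid tiles_word)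

-- ===== LEMMAS AND PROOFS =====

-- A's slice expression removes exactly the first occurrence of `tile`.
theorem removeFirst_eq_erase (grid : List Char) (tile : Char) (h : tile ∈ grid) :
    PySem.List.slice grid none (some (((PySem.List.index? grid tile).getD 0 : Nat) : Int)) ++
    PySem.List.slice grid (some ((((PySem.List.index? grid tile).getD 0 : Nat) : Int) + 1)) none
      = grid.erase tile := by
  obtain ⟨k, hk⟩ : ∃ k, PySem.List.index? grid tile = some k := by
    have := (PySem.List.index?_isSome_iff (xs := grid) (v := tile)).mpr h
    exact Option.isSome_iff_exists.mp this
  obtain ⟨pre, suf, hgrid, hlen, hnot⟩ := (PySem.List.index?_eq_some_iff grid tile k).mp hk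
  rw [hk]
  simp only [Option.getD_some]
  have h1 : ((k : Int) + 1) = ((k + 1 : Nat) : Int) := by push_cast; ring
  rw [h1, PySem.List.slice_to_natCast, PySem.List.slice_from_natCast]
  subst hgrid
  subst hlen
  rw [List.take_left]
  simp [List.erase_append, hnot, List.drop_append]

-- Main invariant: if the dict holds the counts of the grid, the two loops agree.
theorem go_eq (w : List Char) :
    ∀ (grid : List Char) (d : PySem.Dict Char Int),
      (∀ c, d.getD c 0 = (grid.count c : Int)) →
      canTypeGoA grid w = canTypeGoB d w := by
  induction w with
  | nil => intro grid d _; rfl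
  | cons tile rest ih =>
    intro grid d hinv
    simp only [canTypeGoA, canTypeGoB]
    by_cases hm : tile ∈ grid
    · have hcntA : 0 < grid.count tile := List.count_pos_iff.mpr hm
      have hcnt : d.getD tile 0 > 0 := by rw [hinv]; exact_mod_cast hcntA
      rw [if_pos hm, if_pos hcnt, removeFirst_eq_erase grid tile hm]
      apply ih
      intro c
      by_cases hc : c = tile
      · subst hc
        rw [PySem.Dict.getD_insert_self, hinv, List.count_erase_self]
        omega
      · rw [PySem.Dict.getD_insert_of_ne _ _ _ hc, hinv, List.count_erase_of_ne hc]
    · have hz : d.getD tile 0 = 0 := by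
        rw [hinv]; simp [List.count_eq_zero_of_not_mem hm]
      rw [if_neg hm, if_neg (by omega : ¬ d.getD tile 0 > 0)]
      by_cases hq : '?' ∈ grid
      · have htq : tile ≠ '?' := fun h => hm (h ▸ hq)
        have hcntA : 0 < grid.count '?' := List.count_pos_iff.mpr hq
        have hcnt : d.getD '?' 0 > 0 := by rw [hinv]; exact_mod_cast hcntA
        rw [if_pos hq, if_pos hcnt, removeFirst_eq_erase grid '?' hq]
        apply ih
        intro c
        by_cases hc : c = '?'
        · subst hc
          rw [PySem.Dict.getD_insert_self, hinv, List.count_erase_self]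
          omega
        · rw [PySem.Dict.getD_insert_of_ne _ _ _ hc, hinv, List.count_erase_of_ne hc]
      · have hzq : d.getD '?' 0 = 0 := by
          rw [hinv]; simp [List.count_eq_zero_of_not_mem hq]
        rw [if_neg hq, if_neg (by omega : ¬ d.getD '?' 0 > 0)]

-- ===== VERDICT (by name: the statement is the Claim_ definition above) =====
theorem can_type_spec : Claim_equal_can_type := by
  intro g w _
  unfold Spec_can_type can_type can_type_alt
  rw [PySem.Dict.foldl_insert_getD_add_one_eq_counter]
  exact go_eq w.toList g.toList _ (fun c => PySem.Dict.getD_counter g.toList c)
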